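-- pv_equiv track=rewrite | github.com/Panchikoko/Parcial | Menor_Edad.py | menor_edad
-- ===== SOURCE A (Python) =====
-- def menor_edad(matriz):
--     if not matriz or not matriz[0]:
--         return None, []
--
--     min_edad = matriz [0] [0]
--     posiciones = [(0, 0)]
--
--     for i in range(len(matriz)):
--         for j in range(len(matriz[0])):
--             if matriz [i] [j] < min_edad:
--                 min_edad = matriz[i][j]
--                 posiciones = [(i, j)]
--             elif matriz [i] [j] == min_edad:
--                 if (i, j) not in posiciones:
--                     posiciones.append ((i, j))
--
--     return min_edad, posiciones
-- ===== SOURCE B (Python) =====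
-- def menor_edad(matriz):
--     if not matriz or not matriz[0]:
--         return None, []
--     indices = [(i, j) for i in range(len(matriz)) for j in range(len(matriz[0]))]
--     min_edad = min(matriz[i][j] for i, j in indices)
--     posiciones = [(i, j) for i, j in indices if matriz[i][j] == min_edad]
--     return min_edad, posiciones
-- ===== Notes on version B (the rewrite author's own statement) =====
-- stated objective: faster
-- what changed: Replace the single-pass running-min loop that resets/appends a positions list (with a linear 'not in posiciones' membership scan per element) by compute-the-minimum-first and then collect all matching positions with a filter comprehension.
import Mathlib
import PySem

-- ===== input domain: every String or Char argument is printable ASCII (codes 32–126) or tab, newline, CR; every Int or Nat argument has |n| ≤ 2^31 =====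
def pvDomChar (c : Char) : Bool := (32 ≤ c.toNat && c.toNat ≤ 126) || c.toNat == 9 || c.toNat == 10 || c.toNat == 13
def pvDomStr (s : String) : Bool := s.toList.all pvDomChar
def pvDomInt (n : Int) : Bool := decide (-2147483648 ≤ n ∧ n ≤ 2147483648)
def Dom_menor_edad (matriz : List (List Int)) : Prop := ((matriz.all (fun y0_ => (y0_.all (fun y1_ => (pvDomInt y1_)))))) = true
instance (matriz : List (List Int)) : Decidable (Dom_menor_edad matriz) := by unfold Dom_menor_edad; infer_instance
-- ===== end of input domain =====

-- B replaces A's running-min loop (which resets/appends a positions list, with a linear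
-- 'not in posiciones' scan per element) by min-first then a filter of all matching
-- positions, removing that inner scan (measured faster in a timing run).

-- matriz[i][j] (total form; Pre_ keeps every index in range)
def pvGetv (matriz : List (List Int)) (i j : Int) : Int :=
  PySem.List.pyGetD (PySem.List.pyGetD matriz i []) j 0

-- ===== PORT A =====
def menor_edad (matriz : List (List Int)) : Option Int × (List (Int × Int)) :=
  if matriz = [] ∨ matriz.headD [] = [] then (none, [])
  else
    let res :=
      (PySem.List.pyRange 0 (PySem.List.len matriz) 1).foldl (fun s i =>
        (PySem.List.pyRange 0 (PySem.List.len (matriz.headD [])) 1).foldl (fun s j =>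
          if pvGetv matriz i j < s.1 then (pvGetv matriz i j, [(i, j)])
          else if pvGetv matriz i j = s.1 then
            (if (i, j) ∈ s.2 then s else (s.1, s.2 ++ [(i, j)]))
          else s) s)
        (pvGetv matriz 0 0, [((0 : Int), (0 : Int))])
    (some res.1, res.2)

-- ===== PORT B =====
def menor_edad_alt (matriz : List (List Int)) : Option Int × (List (Int × Int)) :=
  if matriz = [] ∨ matriz.headD [] = [] then (none, [])
  else
    let indices :=
      (PySem.List.pyRange 0 (PySem.List.len matriz) 1).flatMap (fun i =>
        (PySem.List.pyRange 0 (PySem.List.len (matriz.headD [])) 1).map (fun j => (i, j)))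
    let mv := (PySem.List.min? (indices.map (fun p => pvGetv matriz p.1 p.2)) (fun x => x)).getD 0
    (some mv, indices.filter (fun p => pvGetv matriz p.1 p.2 = mv))

-- ===== PRECONDITION & SPEC =====
-- Pre_ excludes exactly the ragged matrices with a row shorter than row 0, on which the
-- Python A (and B) raises IndexError; on rectangular input it is trivially satisfied.
def Pre_menor_edad (matriz : List (List Int)) : Prop :=
  ∀ row ∈ matriz, (matriz.headD []).length ≤ row.length
instance (matriz : List (List Int)) : Decidable (Pre_menor_edad matriz) := by
  unfold Pre_menor_edad; infer_instance

def pvWitness_menor_edad : List (List Int) := [[3, 1], [1, 2]]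

def Spec_menor_edad (matriz : List (List Int)) (out : Option Int × (List (Int × Int))) : Prop := out = menor_edad_alt matriz
instance (matriz : List (List Int)) (out : Option Int × (List (Int × Int))) : Decidable (Spec_menor_edad matriz out) := by unfold Spec_menor_edad; infer_instance

-- ===== CLAIM (what is proved, stated in full; the proofs are below) =====
def Claim_equal_menor_edad : Prop := ∀ (matriz : List (List Int)), Dom_menor_edad matriz → Pre_menor_edad matriz → Spec_menor_edad matriz (menor_edad matriz)

-- ===== LEMMAS AND PROOFS =====

-- A's loop body as a step function on the state (min so far, positions)
def pvStep (val : Int × Int → Int) (s : Int × List (Int × Int)) (p : Int × Int) :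
    Int × List (Int × Int) :=
  if val p < s.1 then (val p, [p])
  else if val p = s.1 then (if p ∈ s.2 then s else (s.1, s.2 ++ [p]))
  else s

theorem pv_inv (val : Int × Int → Int) :
    ∀ (ps q : List (Int × Int)) (m : Int),
      (∀ p ∈ q, m ≤ val p) → (∀ p ∈ ps, p ∉ q) → ps.Nodup →
      ps.foldl (pvStep val) (m, q.filter (fun p => val p = m)) =
        (ps.foldl (fun a p => min a (val p)) m,
         (q ++ ps).filter (fun p => val p = ps.foldl (fun a p => min a (val p)) m)) := by
  intro ps
  induction ps with
  | nil => intro q m hq _ _; rw [List.append_nil]; rfl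
  | cons p t ih =>
    intro q m hq hdisj hnd
    have hpq : p ∉ q := hdisj p (by simp)
    have hnd' : t.Nodup := hnd.of_cons
    have hpt : p ∉ t := by simpa using (List.nodup_cons.mp hnd).1
    simp only [List.foldl_cons]
    rcases lt_trichotomy (val p) m with hlt | heq | hgt
    · -- new minimum: state resets to (val p, [p])
      have hstep : pvStep val (m, q.filter (fun p => val p = m)) p = (val p, [p]) := by
        simp [pvStep, hlt]
      rw [hstep]
      have hq' : (q ++ [p]).filter (fun x => val x = val p) = [p] := by
        rw [List.filter_append]
        have : q.filter (fun x => val x = val p) = [] := by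
          rw [List.filter_eq_nil_iff]
          intro x hx
          have := hq x hx
          simp only [decide_eq_true_eq]
          omega
        simp [this]
      have := ih (q ++ [p]) (val p)
        (by intro x hx
            rcases List.mem_append.mp hx with h | h
            · exact le_of_lt (lt_of_lt_of_le hlt (hq x h))
            · simp at h; simp [h])
        (by intro x hx
            simp only [List.mem_append, List.mem_singleton]
            rintro (h | rfl)
            · exact hdisj x (by simp [hx]) h
            · exact hpt hx) hnd'
      rw [show ([p] : List (Int × Int)) = (q ++ [p]).filter (fun x => val x = val p) from hq'.symm,
        this]
      simp [min_eq_right (le_of_lt hlt), List.append_assoc]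
    · -- equal to the minimum: append p (it is not yet in the list)
      have hpf : p ∉ q.filter (fun x => val x = m) := fun h => hpq (List.mem_of_mem_filter h)
      have hstep : pvStep val (m, q.filter (fun x => val x = m)) p
          = (m, q.filter (fun x => val x = m) ++ [p]) := by
        simp [pvStep, heq, hpf]
      rw [hstep]
      have hq' : q.filter (fun x => val x = m) ++ [p] = (q ++ [p]).filter (fun x => val x = m) := by
        rw [List.filter_append]; simp [heq]
      have := ih (q ++ [p]) m
        (by intro x hx
            rcases List.mem_append.mp hx with h | h
            · exact hq x h
            · simp at h; simp [h, heq.ge])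
        (by intro x hx
            simp only [List.mem_append, List.mem_singleton]
            rintro (h | rfl)
            · exact hdisj x (by simp [hx]) h
            · exact hpt hx) hnd'
      rw [hq', this]
      simp only [heq, min_self, List.append_assoc, List.singleton_append]
    · -- larger: state unchanged
      have hstep : pvStep val (m, q.filter (fun x => val x = m)) p
          = (m, q.filter (fun x => val x = m)) := by
        unfold pvStep
        rw [if_neg (by omega), if_neg (by omega)]
      rw [hstep]
      have hq' : q.filter (fun x => val x = m) = (q ++ [p]).filter (fun x => val x = m) := by
        rw [List.filter_append]
        have : [p].filter (fun x => val x = m) = [] := by simp; omega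
        simp [this]
      have := ih (q ++ [p]) m
        (by intro x hx
            rcases List.mem_append.mp hx with h | h
            · exact hq x h
            · simp at h; simp [h]; omega)
        (by intro x hx
            simp only [List.mem_append, List.mem_singleton]
            rintro (h | rfl)
            · exact hdisj x (by simp [hx]) h
            · exact hpt hx) hnd'
      rw [hq', this]
      simp [min_eq_left (le_of_lt hgt), List.append_assoc]

-- the row-major index list is l1 ×ˢ l2
theorem pv_flatMap_eq_product (l1 l2 : List Int) :
    l1.flatMap (fun i => l2.map (fun j => (i, j))) = l1 ×ˢ l2 := rfl

-- ===== VERDICT (by name: the statement is the Claim_ definition above) =====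

theorem menor_edad_spec : Claim_equal_menor_edad := by
  intro matriz _ _
  unfold Spec_menor_edad menor_edad menor_edad_alt
  obtain _ | ⟨r0, rs⟩ := matriz
  · simp
  · by_cases h0 : r0 = []
    · simp [h0]
    · have hguard : ¬((r0 :: rs : List (List Int)) = [] ∨ (r0 :: rs).headD [] = []) := by
        simp [h0]
      rw [if_neg hguard, if_neg hguard]
      dsimp only
      have hrows : (0 : Int) < PySem.List.len (r0 :: rs) := by
        simp [PySem.List.len_eq]
      have hcols : (0 : Int) < PySem.List.len ((r0 :: rs).headD []) := by
        simp [PySem.List.len_eq, List.length_pos_iff, h0]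
      set val : Int × Int → Int := fun p => pvGetv (r0 :: rs) p.1 p.2 with hval
      set R := PySem.List.pyRange 0 (PySem.List.len (r0 :: rs)) 1 with hR
      set C := PySem.List.pyRange 0 (PySem.List.len ((r0 :: rs).headD [])) 1 with hC
      -- A's nested fold = fold of pvStep over the flattened index list
      have hA : ∀ (init : Int × List (Int × Int)),
          R.foldl (fun s i => C.foldl (fun s j =>
            if pvGetv (r0 :: rs) i j < s.1 then (pvGetv (r0 :: rs) i j, [(i, j)])
            else if pvGetv (r0 :: rs) i j = s.1 then
              (if (i, j) ∈ s.2 then s else (s.1, s.2 ++ [(i, j)]))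
            else s) s) init
          = (R.flatMap (fun i => C.map (fun j => (i, j)))).foldl (pvStep val) init := by
        intro init
        rw [List.foldl_flatMap]
        simp only [List.foldl_map]
        rfl
      have hRc : R = 0 :: PySem.List.pyRange 1 (PySem.List.len (r0 :: rs)) 1 :=
        PySem.List.pyRange_one_cons hrows
      have hCc : C = 0 :: PySem.List.pyRange 1 (PySem.List.len ((r0 :: rs).headD [])) 1 :=
        PySem.List.pyRange_one_cons hcols
      set idx := R.flatMap (fun i => C.map (fun j => (i, j))) with hidx
      have hnodup : idx.Nodup := by
        rw [hidx, pv_flatMap_eq_product, hR, hC]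
        exact List.Nodup.product (PySem.List.nodup_pyRange_one _ _) (PySem.List.nodup_pyRange_one _ _)
      obtain ⟨rest, hrest⟩ : ∃ rest, idx = ((0 : Int), (0 : Int)) :: rest := by
        rw [hidx, hRc, hCc]
        simp only [List.flatMap_cons, List.map_cons, List.cons_append]
        exact ⟨_, rfl⟩
      have h00rest : ((0 : Int), (0 : Int)) ∉ rest := by
        have h := hnodup
        rw [hrest] at h
        exact (List.nodup_cons.mp h).1
      have hrestnd : rest.Nodup := by
        have h := hnodup; rw [hrest] at h; exact h.of_cons
      -- the first step of A's fold leaves the seeded state unchanged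
      have hfirst : pvStep val (pvGetv (r0 :: rs) 0 0, [((0 : Int), (0 : Int))]) (0, 0)
          = (pvGetv (r0 :: rs) 0 0, [((0 : Int), (0 : Int))]) := by
        simp [pvStep, hval]
      -- the seeded state is the canonical state for q = [(0,0)]
      have hseed : ([((0 : Int), (0 : Int))] : List (Int × Int))
          = [((0 : Int), (0 : Int))].filter (fun p => val p = pvGetv (r0 :: rs) 0 0) := by
        simp [hval]
      have hAres :
          idx.foldl (pvStep val) (pvGetv (r0 :: rs) 0 0, [((0 : Int), (0 : Int))])
          = (rest.foldl (fun a p => min a (val p)) (pvGetv (r0 :: rs) 0 0),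
             idx.filter (fun p => val p = rest.foldl (fun a p => min a (val p)) (pvGetv (r0 :: rs) 0 0))) := by
        rw [hrest, List.foldl_cons, hfirst]
        conv_lhs => rw [hseed]
        rw [pv_inv val rest [((0 : Int), (0 : Int))] (pvGetv (r0 :: rs) 0 0)
          (by intro p hp; simp at hp; simp [hp, hval])
          (by intro p hp; simp only [List.mem_singleton]; rintro rfl; exact h00rest hp)
          hrestnd]
        rfl
      -- B's minimum is the same running fold
      have hBmin : (PySem.List.min? (idx.map val) (fun x => x)).getD 0
          = rest.foldl (fun a p => min a (val p)) (pvGetv (r0 :: rs) 0 0) := by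
        rw [hrest]
        simp only [List.map_cons]
        rw [PySem.List.min?_id_cons]
        simp [List.foldl_map, hval]
      rw [hA, hAres]
      rw [hBmin]
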